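-- pv_equiv track=rewrite | github.com/giltom/crypt | cryptutil.py | lfsr_stream
-- ===== SOURCE A (Python) =====
-- def lfsr_stream(nbits, start, feedback_bit, length):
--     reg = start
--     out = ''
--     for _ in range(length):
--         bit = reg & 1
--         out += str(bit)
--         feedback = 1 if reg & (1 << feedback_bit) else 0
--         reg = (reg >> 1) | ((feedback ^ bit) << (nbits - 1))
--     return out
-- ===== SOURCE B (Python) =====
-- def lfsr_stream(nbits, start, feedback_bit, length):
--     written = {}
--     out = []
--     for k in range(length):
--         bit = (start >> k) & 1 | written.get(k, 0)
--         fb = (start >> (k + feedback_bit)) & 1 | written.get(k + feedback_bit, 0)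
--         if fb ^ bit:
--             written[k + nbits] = 1
--         out.append(bit)
--     return ''.join(map(str, out))
-- ===== Notes on version B (the rewrite author's own statement) =====
-- stated objective: faster
-- what changed: B never simulates the big-integer register: it views the LFSR as a timeline of bit cells (output bit k is cell k = bit k of start OR-ed with the feedback bit written by step k-nbits, kept in a dict of written cells), so each step costs O(1) small-int work instead of A's O(nbits + feedback_bit)-bit integer arithmetic per step.
import Mathlib
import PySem

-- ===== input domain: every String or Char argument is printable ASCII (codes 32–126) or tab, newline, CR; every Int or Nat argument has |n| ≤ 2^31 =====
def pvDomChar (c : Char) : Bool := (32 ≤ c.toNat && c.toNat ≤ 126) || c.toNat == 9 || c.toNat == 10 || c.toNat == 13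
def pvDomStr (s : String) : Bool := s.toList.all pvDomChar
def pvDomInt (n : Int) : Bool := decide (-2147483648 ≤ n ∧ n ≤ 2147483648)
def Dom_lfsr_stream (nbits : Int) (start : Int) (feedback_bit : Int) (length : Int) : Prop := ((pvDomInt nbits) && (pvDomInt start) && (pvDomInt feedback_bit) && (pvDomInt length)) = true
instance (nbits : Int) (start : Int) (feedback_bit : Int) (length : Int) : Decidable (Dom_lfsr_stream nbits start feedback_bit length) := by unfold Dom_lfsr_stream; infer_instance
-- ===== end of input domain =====

-- B replaces A's per-step big-integer register arithmetic by a timeline of bit cells (output bit k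
-- is bit k of start OR-ed with the feedback bit written by step k-nbits, kept in a dict of written
-- cells), so each step does O(1) small-integer work: measurably faster, asymptotically for large nbits.

-- ===== PORT A =====
-- A: reg = start; out = ''; for _ in range(length): emit reg & 1, shift with feedback.
-- Strings are built on List Char (PySem.Chars side); '+='-concatenation is list append of str(bit).
def lfsr_stream (nbits : Int) (start : Int) (feedback_bit : Int) (length : Int) : String :=
  let st := (PySem.List.pyRange 0 length 1).foldl
    (fun (st : Int × List Char) _ =>
      let reg := st.1
      let bit := PySem.Int.band reg 1
      let out := st.2 ++ PySem.Int.toChars bit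
      let feedback : Int := if PySem.Int.band reg ((1 : Int) <<< feedback_bit.toNat) ≠ 0 then 1 else 0
      (PySem.Int.bor (reg >>> (1 : Nat)) ((PySem.Int.bxor feedback bit) <<< (nbits - 1).toNat), out))
    (start, [])
  String.mk st.2

-- ===== PORT B =====
-- B (Source B): for k in range(length): read cell k and cell k+feedback_bit (bit of start OR-ed with a
-- possible write recorded in the dict), write cell k+nbits on feedback, collect the output bits,
-- join at the end.  `start >> k` with k ≥ 0 (k comes from range(length)) is `>>> k.toNat`.
def lfsr_stream_alt (nbits : Int) (start : Int) (feedback_bit : Int) (length : Int) : String :=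
  let st := (PySem.List.pyRange 0 length 1).foldl
    (fun (st : PySem.Dict Int Int × List Int) k =>
      let bit := PySem.Int.bor (PySem.Int.band (start >>> k.toNat) 1) (st.1.getD k 0)
      let fb := PySem.Int.bor (PySem.Int.band (start >>> (k + feedback_bit).toNat) 1)
        (st.1.getD (k + feedback_bit) 0)
      let written := if PySem.Int.bxor fb bit ≠ 0 then st.1.insert (k + nbits) 1 else st.1
      (written, st.2 ++ [bit]))
    (PySem.Dict.empty, [])
  String.mk (PySem.Chars.join [] (st.2.map PySem.Int.toChars))

-- ===== PRECONDITION & SPEC =====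
-- Pre_ excludes exactly the inputs where Python A raises (ValueError: negative shift count):
-- when at least one bit is produced, `1 << feedback_bit` needs feedback_bit ≥ 0 and
-- `<< (nbits - 1)` needs nbits ≥ 1.  A returns on every other input.
def Pre_lfsr_stream (nbits : Int) (start : Int) (feedback_bit : Int) (length : Int) : Prop :=
  length ≤ 0 ∨ (1 ≤ nbits ∧ 0 ≤ feedback_bit)
instance (nbits : Int) (start : Int) (feedback_bit : Int) (length : Int) : Decidable (Pre_lfsr_stream nbits start feedback_bit length) := by unfold Pre_lfsr_stream; infer_instance

def pvWitness_lfsr_stream : Int × Int × Int × Int := (4, 9, 3, 10)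

def Spec_lfsr_stream (nbits : Int) (start : Int) (feedback_bit : Int) (length : Int) (out : String) : Prop := out = lfsr_stream_alt nbits start feedback_bit length
instance (nbits : Int) (start : Int) (feedback_bit : Int) (length : Int) (out : String) : Decidable (Spec_lfsr_stream nbits start feedback_bit length out) := by unfold Spec_lfsr_stream; infer_instance

-- ===== CLAIM (what is proved, stated in full; the proofs are below) =====
def Claim_equal_lfsr_stream : Prop := ∀ (nbits : Int) (start : Int) (feedback_bit : Int) (length : Int), Dom_lfsr_stream nbits start feedback_bit length → Pre_lfsr_stream nbits start feedback_bit length → Spec_lfsr_stream nbits start feedback_bit length (lfsr_stream nbits start feedback_bit length)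

-- ===== LEMMAS AND PROOFS =====

theorem pv_nat_or_of_and_eq_zero : ∀ (a b : Nat), a &&& b = 0 → a ||| b = a + b := by
  intro a
  induction a using Nat.binaryRec with
  | zero => simp
  | bit bb m ih =>
    intro b hb
    cases b using Nat.binaryRec with
    | zero => simp
    | bit cc n =>
      rw [Nat.land_bit] at hb
      rw [Nat.lor_bit]
      have h0 : (bb && cc) = false ∧ m &&& n = 0 := by
        cases hbc : (bb && cc) <;> rw [hbc] at hb <;> simp [Nat.bit] at hb <;> simp [hb] <;> omega
      rw [ih n h0.2]
      cases bb <;> cases cc <;> simp_all [Nat.bit] <;> omega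

theorem pv_ldiff_or (m n : Nat) : (m.ldiff n) ||| (m &&& n) = m := by
  apply Nat.eq_of_testBit_eq
  intro i
  simp [Nat.testBit_lor, Nat.testBit_ldiff, Nat.testBit_land]
  by_cases h : m.testBit i <;> by_cases h2 : n.testBit i <;> simp [h, h2]

theorem pv_ldiff_and (m n : Nat) : (m.ldiff n) &&& (m &&& n) = 0 := by
  apply Nat.eq_of_testBit_eq
  intro i
  simp [Nat.testBit_land, Nat.testBit_ldiff]
  by_cases h : m.testBit i <;> by_cases h2 : n.testBit i <;> simp [h, h2]

theorem pv_nat_sub_and (m n : Nat) : m - (m &&& n) = m.ldiff n := by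
  have h := pv_nat_or_of_and_eq_zero _ _ (pv_ldiff_and m n)
  have h2 := pv_ldiff_or m n
  omega

theorem pv_band_eq_land (a b : Int) : PySem.Int.band a b = Int.land a b := by
  cases a with
  | ofNat m =>
    cases b with
    | ofNat n => simp [PySem.Int.band, Int.land]
    | negSucc n =>
      have h1 : ¬ (0:Int) ≤ Int.negSucc n := by omega
      have h2 : ((- Int.negSucc n - 1)).toNat = n := by simp [Int.negSucc_eq]
      simp [PySem.Int.band, Int.land, h1, h2, pv_nat_sub_and]
  | negSucc m =>
    have h1 : ¬ (0:Int) ≤ Int.negSucc m := by omega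
    have h2 : ((- Int.negSucc m - 1)).toNat = m := by simp [Int.negSucc_eq]
    cases b with
    | ofNat n => simp [PySem.Int.band, Int.land, h1, h2, pv_nat_sub_and]
    | negSucc n =>
      have h3 : ¬ (0:Int) ≤ Int.negSucc n := by omega
      have h4 : ((- Int.negSucc n - 1)).toNat = n := by simp [Int.negSucc_eq]
      simp [PySem.Int.band, Int.land, h1, h2, h3, h4, Int.negSucc_eq]
      omega

theorem pv_bor_eq_lor (a b : Int) : PySem.Int.bor a b = Int.lor a b := by
  cases a with
  | ofNat m =>
    cases b with
    | ofNat n => simp [PySem.Int.bor, Int.lor]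
    | negSucc n =>
      have h1 : ¬ (0:Int) ≤ Int.negSucc n := by omega
      have h2 : ((- Int.negSucc n - 1)).toNat = n := by simp [Int.negSucc_eq]
      simp [PySem.Int.bor, Int.lor, h1, h2, pv_nat_sub_and, Int.negSucc_eq]
      omega
  | negSucc m =>
    have h1 : ¬ (0:Int) ≤ Int.negSucc m := by omega
    have h2 : ((- Int.negSucc m - 1)).toNat = m := by simp [Int.negSucc_eq]
    cases b with
    | ofNat n =>
      simp [PySem.Int.bor, Int.lor, h1, h2, pv_nat_sub_and, Int.negSucc_eq]
      omega
    | negSucc n =>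
      have h3 : ¬ (0:Int) ≤ Int.negSucc n := by omega
      have h4 : ((- Int.negSucc n - 1)).toNat = n := by simp [Int.negSucc_eq]
      simp [PySem.Int.bor, Int.lor, h1, h2, h3, h4, Int.negSucc_eq]
      omega

theorem pv_testBit_shiftRight (a : Int) (n i : Nat) : (a >>> n).testBit i = a.testBit (n + i) := by
  rw [Int.shiftRight_eq]
  cases a with
  | ofNat m =>
    show (Int.ofNat (m >>> n)).testBit i = (Int.ofNat m).testBit (n+i)
    simp [Int.testBit, Nat.testBit_shiftRight]
  | negSucc m =>
    show (Int.negSucc (m >>> n)).testBit i = (Int.negSucc m).testBit (n+i)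
    simp [Int.testBit, Nat.testBit_shiftRight]

def pvBool (b : Bool) : Int := if b then 1 else 0

theorem pv_band_one (a : Int) : PySem.Int.band a 1 = pvBool (a.testBit 0) := by
  rw [pv_band_eq_land]
  cases a with
  | ofNat m =>
    rw [show Int.land (Int.ofNat m) 1 = ((m &&& 1 : Nat) : Int) from rfl]
    rw [Nat.and_one_is_mod]
    simp [Int.testBit, pvBool, Nat.testBit_zero]
    omega
  | negSucc m =>
    rw [show Int.land (Int.negSucc m) 1 = ((Nat.ldiff 1 m : Nat) : Int) from rfl]
    rw [← pv_nat_sub_and, Nat.one_and_eq_mod_two]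
    simp [Int.testBit, pvBool, Nat.testBit_zero]
    omega

theorem pv_band_mask (a : Int) (F : Nat) :
    (PySem.Int.band a ((1 : Int) <<< F) ≠ 0) ↔ a.testBit F = true := by
  rw [pv_band_eq_land]
  have hsl : ((1 : Int) <<< F) = ((2 ^ F : Nat) : Int) := by
    rw [show (1:Int) = Int.ofNat 1 from rfl]
    rw [show Int.ofNat 1 <<< F = Int.ofNat (1 <<< F) from rfl]
    simp [Nat.shiftLeft_eq]
  rw [hsl]
  cases a with
  | ofNat m =>
    rw [show Int.land (Int.ofNat m) ((2 ^ F : Nat) : Int) = ((m &&& 2 ^ F : Nat) : Int) from rfl]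
    rw [Nat.and_two_pow]
    simp [Int.testBit]
  | negSucc m =>
    rw [show Int.land (Int.negSucc m) ((2 ^ F : Nat) : Int) = ((Nat.ldiff (2 ^ F) m : Nat) : Int) from rfl]
    rw [← pv_nat_sub_and, Nat.two_pow_and]
    have hp : 0 < 2 ^ F := Nat.two_pow_pos F
    simp [Int.testBit]
    by_cases h : m.testBit F <;> simp [h] <;> omega

theorem pv_pvBool_shiftLeft_testBit (b : Bool) (s i : Nat) :
    ((pvBool b) <<< s).testBit i = (b && decide (i = s)) := by
  cases b with
  | false =>
    show ((Int.ofNat 0) <<< s).testBit i = false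
    rw [show (Int.ofNat 0) <<< s = Int.ofNat (0 <<< s) from rfl]
    simp [Int.testBit]
  | true =>
    show ((Int.ofNat 1) <<< s).testBit i = decide (i = s)
    rw [show (Int.ofNat 1) <<< s = Int.ofNat (1 <<< s) from rfl]
    simp only [Int.testBit, Nat.testBit_shiftLeft]
    by_cases h : i = s
    · subst h
      simp [Nat.testBit_zero]
    · by_cases h2 : s ≤ i
      · have h3 : i - s ≠ 0 := by omega
        rcases Nat.exists_eq_succ_of_ne_zero h3 with ⟨u, hu⟩
        simp [h2, hu, h, Nat.testBit_succ]
      · simp [h, h2]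

def pvV (N F : Nat) (tb : Nat → Bool) (j : Nat) : Bool :=
  (tb j || (if h : 0 < N ∧ N ≤ j then pvV N F tb (j - N) else false)) !=
  (tb (j + F) || (if h : 0 < N ∧ N ≤ j + F ∧ j + F - N < j then pvV N F tb (j + F - N) else false))
  termination_by j
  decreasing_by all_goals omega

def pvCell (N F : Nat) (tb : Nat → Bool) (j c : Nat) : Bool :=
  tb c || (if 0 < N ∧ N ≤ c ∧ c - N < j then pvV N F tb (c - N) else false)

theorem pvV_eq_cell (N F : Nat) (tb : Nat → Bool) (j : Nat) :
    pvV N F tb j = (pvCell N F tb j j != pvCell N F tb j (j + F)) := by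
  rw [pvV, pvCell, pvCell]
  have h1 : (if h : 0 < N ∧ N ≤ j then pvV N F tb (j - N) else false)
      = (if 0 < N ∧ N ≤ j ∧ j - N < j then pvV N F tb (j - N) else false) := by
    split_ifs <;> first | rfl | omega
  have h2 : (if h : 0 < N ∧ N ≤ j + F ∧ j + F - N < j then pvV N F tb (j + F - N) else false)
      = (if 0 < N ∧ N ≤ j + F ∧ j + F - N < j then pvV N F tb (j + F - N) else false) := by
    split_ifs <;> rfl
  rw [h1, h2]

def pvStep (nbits feedback_bit : Int) (reg : Int) : Int :=
  let bit := PySem.Int.band reg 1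
  let feedback : Int := if PySem.Int.band reg ((1 : Int) <<< feedback_bit.toNat) ≠ 0 then 1 else 0
  PySem.Int.bor (reg >>> (1 : Nat)) ((PySem.Int.bxor feedback bit) <<< (nbits - 1).toNat)

theorem pv_bor_pvBool (b c : Bool) : PySem.Int.bor (pvBool b) (pvBool c) = pvBool (b || c) := by
  cases b <;> cases c <;> decide

theorem pv_bxor_pvBool (b c : Bool) : PySem.Int.bxor (pvBool b) (pvBool c) = pvBool (b != c) := by
  cases b <;> cases c <;> decide

theorem pv_regBit (nbits start feedback_bit : Int) (N F : Nat)
    (hN : nbits = (N : Int)) (hNpos : 0 < N) (hF : feedback_bit = (F : Int)) :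
    ∀ (k i : Nat), ((pvStep nbits feedback_bit)^[k] start).testBit i
      = pvCell N F start.testBit k (k + i) := by
  intro k
  induction k with
  | zero =>
    intro i
    simp only [Function.iterate_zero, id_eq, pvCell, Nat.zero_add]
    rw [if_neg (by omega)]
    simp
  | succ k ih =>
    intro i
    rw [Function.iterate_succ_apply']
    set x := (pvStep nbits feedback_bit)^[k] start with hx
    have hbit : PySem.Int.band x 1 = pvBool (pvCell N F start.testBit k k) := by
      rw [pv_band_one]
      have h0 := ih 0
      rw [Nat.add_zero] at h0
      rw [h0]
    have hfb : (if PySem.Int.band x ((1 : Int) <<< feedback_bit.toNat) ≠ 0 then (1:Int) else 0)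
        = pvBool (pvCell N F start.testBit k (k + F)) := by
      have hFt : feedback_bit.toNat = F := by rw [hF]; simp
      rw [hFt]
      by_cases h : PySem.Int.band x ((1 : Int) <<< F) ≠ 0
      · rw [if_pos h]
        have ht := (pv_band_mask x F).mp h
        rw [ih F] at ht
        rw [ht]
        rfl
      · rw [if_neg h]
        have h2 : x.testBit F = false := by
          by_contra hc
          simp at hc
          exact h ((pv_band_mask x F).mpr hc)
        rw [ih F] at h2
        rw [h2]
        rfl
    simp only [pvStep]
    rw [hbit, hfb, pv_bxor_pvBool]
    have hv : (pvCell N F start.testBit k (k + F) != pvCell N F start.testBit k k)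
        = pvV N F start.testBit k := by
      rw [pvV_eq_cell]
      cases pvCell N F start.testBit k k <;> cases pvCell N F start.testBit k (k + F) <;> rfl
    rw [hv]
    have hN1 : (nbits - 1).toNat = N - 1 := by rw [hN]; omega
    rw [hN1, pv_bor_eq_lor, Int.testBit_lor, pv_testBit_shiftRight, pv_pvBool_shiftLeft_testBit]
    rw [ih (1 + i)]
    rw [pvCell, pvCell, show k + (1 + i) = k + 1 + i from by omega]
    by_cases hiN : i = N - 1
    · have hc : k + 1 + i - N = k := by omega
      rw [if_pos (show 0 < N ∧ N ≤ k + 1 + i ∧ k + 1 + i - N < k + 1 from by omega), hc]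
      rw [if_neg (show ¬ (0 < N ∧ N ≤ k + 1 + i ∧ k < k) from by omega)]
      simp [hiN]
    · by_cases hold : 0 < N ∧ N ≤ k + 1 + i ∧ k + 1 + i - N < k + 1
      · rw [if_pos hold, if_pos (show 0 < N ∧ N ≤ k + 1 + i ∧ k + 1 + i - N < k from by omega)]
        simp [hiN]
      · rw [if_neg hold, if_neg (show ¬ (0 < N ∧ N ≤ k + 1 + i ∧ k + 1 + i - N < k) from by omega)]
        simp [hiN]


def pvWrittenSpec (N F : Nat) (tb : Nat → Bool) (k : Nat) (c : Int) : Option Int :=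
  if ∃ j : Nat, j < k ∧ c = ((j + N : Nat) : Int) ∧ pvV N F tb j = true then some 1 else none

theorem pv_read (N F : Nat) (tb : Nat → Bool) (hNpos : 0 < N) (k : Nat)
    (d : PySem.Dict Int Int) (hd : ∀ c : Int, d.get? c = pvWrittenSpec N F tb k c) (c : Nat) :
    (d.get? ((c : Nat) : Int)).getD 0
      = pvBool (if 0 < N ∧ N ≤ c ∧ c - N < k then pvV N F tb (c - N) else false) := by
  rw [hd, pvWrittenSpec]
  by_cases hcond : 0 < N ∧ N ≤ c ∧ c - N < k
  · rw [if_pos hcond]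
    cases hv : pvV N F tb (c - N) with
    | true =>
      rw [if_pos ⟨c - N, by omega, by exact_mod_cast (by omega : c = c - N + N), hv⟩]
      rfl
    | false =>
      rw [if_neg ?_]
      · rfl
      · rintro ⟨j, hj1, hj2, hj3⟩
        have hj : c = j + N := by exact_mod_cast hj2
        have : j = c - N := by omega
        rw [this] at hj3
        rw [hj3] at hv
        exact Bool.noConfusion hv
  · rw [if_neg hcond, if_neg ?_]
    · rfl
    · rintro ⟨j, hj1, hj2, hj3⟩
      have hj : c = j + N := by exact_mod_cast hj2
      exact hcond ⟨hNpos, by omega, by omega⟩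

theorem lfsrB_loop (nbits start feedback_bit : Int) (N F : Nat)
    (hN : nbits = (N : Int)) (hNpos : 0 < N) (hF : feedback_bit = (F : Int)) :
    ∀ (L : Nat),
      (((List.range L).map (fun j : Nat => (j : Int))).foldl
        (fun (st : PySem.Dict Int Int × List Int) k =>
          let bit := PySem.Int.bor (PySem.Int.band (start >>> k.toNat) 1) (st.1.getD k 0)
          let fb := PySem.Int.bor (PySem.Int.band (start >>> (k + feedback_bit).toNat) 1)
            (st.1.getD (k + feedback_bit) 0)
          let written := if PySem.Int.bxor fb bit ≠ 0 then st.1.insert (k + nbits) 1 else st.1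
          (written, st.2 ++ [bit]))
        (PySem.Dict.empty, [])).2
        = (List.range L).map (fun j => pvBool (pvCell N F start.testBit j j)) ∧
      (∀ c : Int, (((List.range L).map (fun j : Nat => (j : Int))).foldl
        (fun (st : PySem.Dict Int Int × List Int) k =>
          let bit := PySem.Int.bor (PySem.Int.band (start >>> k.toNat) 1) (st.1.getD k 0)
          let fb := PySem.Int.bor (PySem.Int.band (start >>> (k + feedback_bit).toNat) 1)
            (st.1.getD (k + feedback_bit) 0)
          let written := if PySem.Int.bxor fb bit ≠ 0 then st.1.insert (k + nbits) 1 else st.1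
          (written, st.2 ++ [bit]))
        (PySem.Dict.empty, [])).1.get? c = pvWrittenSpec N F start.testBit L c) := by
  intro L
  induction L with
  | zero =>
    refine ⟨rfl, ?_⟩
    intro c
    rw [pvWrittenSpec, if_neg (by simp)]
    exact PySem.Dict.get?_empty c
  | succ L ih =>
    obtain ⟨ih2, ih1⟩ := ih
    rw [List.range_succ, List.map_append, List.foldl_append]
    set st := ((List.range L).map (fun j : Nat => (j : Int))).foldl
        (fun (st : PySem.Dict Int Int × List Int) k =>
          let bit := PySem.Int.bor (PySem.Int.band (start >>> k.toNat) 1) (st.1.getD k 0)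
          let fb := PySem.Int.bor (PySem.Int.band (start >>> (k + feedback_bit).toNat) 1)
            (st.1.getD (k + feedback_bit) 0)
          let written := if PySem.Int.bxor fb bit ≠ 0 then st.1.insert (k + nbits) 1 else st.1
          (written, st.2 ++ [bit]))
        (PySem.Dict.empty, []) with hst
    clear_value st
    simp only [List.map_cons, List.map_nil, List.foldl_cons, List.foldl_nil]
    have hkey2 : ((L : Int) + feedback_bit) = ((L + F : Nat) : Int) := by
      rw [hF]; push_cast; ring
    have hkeyN : ((L : Int) + nbits) = ((L + N : Nat) : Int) := by
      rw [hN]; push_cast; ring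
    have htn2 : ((L : Int) + feedback_bit).toNat = L + F := by rw [hF]; omega
    simp only [Int.toNat_natCast, Int.shiftRight_natCast_right, htn2, hkey2, hkeyN]
    simp only [pv_band_one, pv_testBit_shiftRight, Nat.add_zero]
    have hgetD : ∀ (c : Int), st.1.getD c 0 = (st.1.get? c).getD 0 := fun _ => rfl
    simp only [hgetD]
    rw [pv_read N F start.testBit hNpos L st.1 ih1 L,
      pv_read N F start.testBit hNpos L st.1 ih1 (L + F)]
    have hcell : ∀ (j c : Nat),
        (start.testBit c || if 0 < N ∧ N ≤ c ∧ c - N < j then pvV N F start.testBit (c - N) else false)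
          = pvCell N F start.testBit j c := fun _ _ => rfl
    simp only [pv_bor_pvBool, hcell]
    have hxor : PySem.Int.bxor (pvBool (pvCell N F start.testBit L (L + F)))
          (pvBool (pvCell N F start.testBit L L))
        = pvBool (pvV N F start.testBit L) := by
      rw [pv_bxor_pvBool, pvV_eq_cell]
      cases pvCell N F start.testBit L L <;> cases pvCell N F start.testBit L (L + F) <;> rfl
    simp only [hxor]
    constructor
    · rw [ih2, List.map_append]
      simp only [List.map_cons, List.map_nil]
    · intro c
      by_cases hv : pvV N F start.testBit L = true
      · rw [if_pos (by simp [hv, pvBool])]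
        by_cases hc : c = ((L + N : Nat) : Int)
        · subst hc
          rw [PySem.Dict.get?_insert_self]
          rw [pvWrittenSpec, if_pos ⟨L, by omega, rfl, hv⟩]
        · rw [PySem.Dict.get?_insert_of_ne _ _ hc, ih1, pvWrittenSpec, pvWrittenSpec]
          congr 1
          apply propext
          constructor
          · rintro ⟨j, hj1, hj2, hj3⟩; exact ⟨j, by omega, hj2, hj3⟩
          · rintro ⟨j, hj1, hj2, hj3⟩
            refine ⟨j, ?_, hj2, hj3⟩
            rcases Nat.lt_succ_iff_lt_or_eq.mp hj1 with h | h
            · exact h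
            · subst h; exact absurd hj2 hc
      · rw [if_neg (by simp only [Bool.not_eq_true] at hv; simp [hv, pvBool])]
        rw [ih1, pvWrittenSpec, pvWrittenSpec]
        congr 1
        apply propext
        constructor
        · rintro ⟨j, hj1, hj2, hj3⟩; exact ⟨j, by omega, hj2, hj3⟩
        · rintro ⟨j, hj1, hj2, hj3⟩
          refine ⟨j, ?_, hj2, hj3⟩
          rcases Nat.lt_succ_iff_lt_or_eq.mp hj1 with h | h
          · exact h
          · subst h
            rw [hj3] at hv
            exact absurd rfl hv

-- ---------- Port A: its foldl emits the register trajectory ----------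

def lfsrTraj (nbits feedback_bit x : Int) (n : Nat) : List Int :=
  (List.range n).map (fun k => PySem.Int.band ((pvStep nbits feedback_bit)^[k] x) 1)

def lfsrRender (bs : List Int) : List Char := (bs.map PySem.Int.toChars).flatten

theorem lfsrTraj_succ_left (nbits feedback_bit x : Int) (n : Nat) :
    lfsrTraj nbits feedback_bit x (n + 1) =
      PySem.Int.band x 1 :: lfsrTraj nbits feedback_bit (pvStep nbits feedback_bit x) n := by
  simp [lfsrTraj, List.range_succ_eq_map, List.map_map, Function.comp_def,
    Function.iterate_succ_apply]

theorem lfsrA_foldl (nbits feedback_bit : Int) (l : List Int) :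
    ∀ (reg : Int) (out : List Char),
      l.foldl
        (fun (st : Int × List Char) _ =>
          let reg := st.1
          let bit := PySem.Int.band reg 1
          let out := st.2 ++ PySem.Int.toChars bit
          let feedback : Int := if PySem.Int.band reg ((1 : Int) <<< feedback_bit.toNat) ≠ 0 then 1 else 0
          (PySem.Int.bor (reg >>> (1 : Nat)) ((PySem.Int.bxor feedback bit) <<< (nbits - 1).toNat), out))
        (reg, out) =
      ((pvStep nbits feedback_bit)^[l.length] reg,
        out ++ lfsrRender (lfsrTraj nbits feedback_bit reg l.length)) := by
  induction l with
  | nil => intro reg out; simp [lfsrTraj, lfsrRender]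
  | cons x xs ih =>
    intro reg out
    rw [List.foldl_cons, ih]
    have hb : PySem.Int.bor (reg >>> (1 : Nat))
          ((PySem.Int.bxor (if PySem.Int.band reg ((1 : Int) <<< feedback_bit.toNat) ≠ 0 then 1 else 0)
            (PySem.Int.band reg 1)) <<< (nbits - 1).toNat)
        = pvStep nbits feedback_bit reg := rfl
    simp only [List.length_cons, lfsrTraj_succ_left, Function.iterate_succ_apply, hb]
    have hr : lfsrRender (PySem.Int.band reg 1 ::
          lfsrTraj nbits feedback_bit (pvStep nbits feedback_bit reg) xs.length)
        = PySem.Int.toChars (PySem.Int.band reg 1) ++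
          lfsrRender (lfsrTraj nbits feedback_bit (pvStep nbits feedback_bit reg) xs.length) := rfl
    simp [hr, List.append_assoc]

theorem lfsrA_eq_render (nbits start feedback_bit length : Int) :
    lfsr_stream nbits start feedback_bit length =
      String.mk (lfsrRender (lfsrTraj nbits feedback_bit start length.toNat)) := by
  unfold lfsr_stream
  rw [lfsrA_foldl]
  simp [PySem.List.length_pyRange_one]

theorem chars_join_nil_eq_flatten (xs : List (List Char)) :
    PySem.Chars.join [] xs = xs.flatten := by
  induction xs with
  | nil => rfl
  | cons a l ih =>
    cases l with
    | nil => simp [PySem.Chars.join, List.intercalate]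
    | cons b l2 =>
      rw [PySem.Chars.join_cons_cons, ih]
      simp

theorem pv_traj_bit (nbits start feedback_bit : Int) (N F : Nat)
    (hN : nbits = (N : Int)) (hNpos : 0 < N) (hF : feedback_bit = (F : Int)) (k : Nat) :
    PySem.Int.band ((pvStep nbits feedback_bit)^[k] start) 1
      = pvBool (pvCell N F start.testBit k k) := by
  rw [pv_band_one]
  have h0 := pv_regBit nbits start feedback_bit N F hN hNpos hF k 0
  rw [Nat.add_zero] at h0
  rw [h0]

-- ===== VERDICT (by name: the statement is the Claim_ definition above) =====
theorem lfsr_stream_spec : Claim_equal_lfsr_stream := by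
  intro nbits start feedback_bit length _ hpre
  unfold Spec_lfsr_stream
  rw [lfsrA_eq_render]
  unfold lfsr_stream_alt
  by_cases hlen : length ≤ 0
  · rw [PySem.List.pyRange_one_eq_nil hlen]
    rw [show length.toNat = 0 from by omega]
    rfl
  · have hpre' : 1 ≤ nbits ∧ 0 ≤ feedback_bit := hpre.resolve_left hlen
    have hN : nbits = ((nbits.toNat : Nat) : Int) := by omega
    have hF : feedback_bit = ((feedback_bit.toNat : Nat) : Int) := by omega
    have hNpos : 0 < nbits.toNat := by omega
    have hpr : PySem.List.pyRange 0 length 1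
        = (List.range length.toNat).map (fun j : Nat => (j : Int)) := by
      rw [PySem.List.pyRange_one]
      simp
    obtain ⟨hacc, _⟩ := lfsrB_loop nbits start feedback_bit nbits.toNat feedback_bit.toNat
      hN hNpos hF length.toNat
    have htraj : lfsrTraj nbits feedback_bit start length.toNat
        = (List.range length.toNat).map
            (fun j => pvBool (pvCell nbits.toNat feedback_bit.toNat start.testBit j j)) := by
      unfold lfsrTraj
      apply List.map_congr_left
      intro k _
      exact pv_traj_bit nbits start feedback_bit nbits.toNat feedback_bit.toNat hN hNpos hF k
    simp only [hpr, hacc, htraj, chars_join_nil_eq_flatten]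
    rfl
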